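-- pv_equiv track=rewrite | github.com/dfreddy/Recommender-System | recommender/Recommender.py | get_sorted_dict_indexes
-- ===== SOURCE A (Python) =====
-- import Utils, SVD_Inference, Matrix, operator, time, math, json
--
-- def get_sorted_dict_indexes(unsorted_dict):
--     sorted_dict = sorted(unsorted_dict.items(), key=operator.itemgetter(1), reverse=False)
--     sorted_with_indexes = {}
--     index, c = 1, 0
--     while c < len(sorted_dict):
--         if c == 0:
--             sorted_with_indexes[sorted_dict[c][0]] = index
--             index += 1
--             c += 1
--             continue
--
--         if sorted_dict[c][1] > sorted_dict[c-1][1]: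
--             sorted_with_indexes[sorted_dict[c][0]] = index
--         else:
--             sorted_with_indexes[sorted_dict[c][0]] = sorted_with_indexes[sorted_dict[c-1][0]]
--
--         index += 1
--         c += 1
--
--     return sorted_with_indexes
-- ===== SOURCE B (Python) =====
-- import operator
--
-- def get_sorted_dict_indexes(unsorted_dict):
--     # competition ("min") rank: every key whose value first appears at sorted
--     # position i (0-based) gets rank i + 1, shared by all ties of that value
--     items = sorted(unsorted_dict.items(), key=operator.itemgetter(1))
--     first = {}
--     for i, (k, v) in enumerate(items):
--         first.setdefault(v, i + 1)
--     return {k: first[v] for k, v in items}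
-- ===== Notes on version B (the rewrite author's own statement) =====
-- stated objective: alternative
-- what changed: Replaces the index-and-carry while loop (which copies the previous key's rank on ties via a lookup of the previous key) by a two-pass scheme: a first-occurrence dict mapping each value to 1 + its first sorted position, then a dict comprehension assigning first[v] to every key.
import Mathlib
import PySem

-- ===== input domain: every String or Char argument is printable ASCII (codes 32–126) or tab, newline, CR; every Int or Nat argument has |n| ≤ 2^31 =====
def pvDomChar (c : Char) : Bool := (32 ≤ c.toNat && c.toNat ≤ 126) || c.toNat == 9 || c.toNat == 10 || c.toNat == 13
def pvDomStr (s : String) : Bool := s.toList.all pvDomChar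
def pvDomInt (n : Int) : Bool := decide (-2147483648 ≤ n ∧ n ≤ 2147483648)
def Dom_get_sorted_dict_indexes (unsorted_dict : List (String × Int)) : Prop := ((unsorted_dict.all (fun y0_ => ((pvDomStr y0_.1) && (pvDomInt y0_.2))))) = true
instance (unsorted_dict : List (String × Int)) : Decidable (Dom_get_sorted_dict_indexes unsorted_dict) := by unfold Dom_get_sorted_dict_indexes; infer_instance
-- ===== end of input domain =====

-- B replaces A's index-carrying while loop by a direct rank formula (1 + count of strictly
-- smaller values) (a first-occurrence dict over the sorted items); objective: alternative.

-- ===== PORT A =====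
-- while loop over c with state (sorted_with_indexes, index, c); the dict lookup
-- sorted_with_indexes[sorted_dict[c-1][0]] always finds its key (it was written at step c-1),
-- so getD … 0 is exact here (the 0 default is never used).
def pvALoop (s : List (String × Int)) (d : PySem.Dict String Int) (index : Int) (c : Nat) :
    PySem.Dict String Int :=
  if h : c < s.length then
    if hc : c = 0 then
      pvALoop s (d.insert (s[c]).1 index) (index + 1) (c + 1)
    else
      let d' :=
        if (s[c]).2 > ((s[c-1]'(by omega)).2) then d.insert (s[c]).1 index
        else d.insert (s[c]).1 (d.getD ((s[c-1]'(by omega)).1) 0)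
      pvALoop s d' (index + 1) (c + 1)
  else d
termination_by s.length - c

def get_sorted_dict_indexes (unsorted_dict : List (String × Int)) : List (String × Int) :=
  let sorted_dict := PySem.List.sorted unsorted_dict (fun p => p.2) false
  (pvALoop sorted_dict PySem.Dict.empty 1 0).items

-- ===== PORT B =====
-- first-occurrence dict: for i,(k,v) in enumerate(items): first.setdefault(v, i+1);
-- then {k: first[v] for k, v in items}. first[v] always finds its key (every v of items
-- was offered to setdefault), so getD … 0 is exact (the 0 default is never used).
def get_sorted_dict_indexes_alt (unsorted_dict : List (String × Int)) : List (String × Int) :=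
  let items := PySem.List.sorted unsorted_dict (fun p => p.2) false
  let first := (PySem.List.enumerate items).foldl
    (fun d ip => d.setdefault ip.2.2 (ip.1 + 1)) PySem.Dict.empty
  (items.foldl (fun d p => d.insert p.1 (first.getD p.2 0)) PySem.Dict.empty).items

-- ===== PRECONDITION & SPEC =====
def Spec_get_sorted_dict_indexes (unsorted_dict : List (String × Int)) (out : List (String × Int)) : Prop := out = get_sorted_dict_indexes_alt unsorted_dict
instance (unsorted_dict : List (String × Int)) (out : List (String × Int)) : Decidable (Spec_get_sorted_dict_indexes unsorted_dict out) := by unfold Spec_get_sorted_dict_indexes; infer_instance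

-- ===== CLAIM (what is proved, stated in full; the proofs are below) =====
def Claim_equal_get_sorted_dict_indexes : Prop := ∀ (unsorted_dict : List (String × Int)), Dom_get_sorted_dict_indexes unsorted_dict → Spec_get_sorted_dict_indexes unsorted_dict (get_sorted_dict_indexes unsorted_dict)

-- ===== LEMMAS AND PROOFS =====

-- B's fold, started from an arbitrary dict (proof helper).
def pvB (values : List Int) (l : List (String × Int)) (d : PySem.Dict String Int) :
    PySem.Dict String Int :=
  l.foldl (fun d p => d.insert p.1 (1 + (values.countP (fun w => decide (w < p.2)) : Int))) d

theorem pvB_append (values : List Int) (l₁ l₂ : List (String × Int)) (d : PySem.Dict String Int) :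
    pvB values (l₁ ++ l₂) d = pvB values l₂ (pvB values l₁ d) := by
  simp [pvB, List.foldl_append]

-- In a value-sorted list, if everything before position c is strictly below v = s[c].2,
-- the number of values strictly below v is exactly c.
theorem pvCount_eq (s : List (String × Int)) (hs : s.Pairwise (fun a b => a.2 ≤ b.2))
    (c : Nat) (h : c < s.length) (v : Int) (hv : v = (s[c]).2)
    (hlt : ∀ j, (hj : j < c) → (s[j]'(by omega)).2 < v) :
    s.countP (fun p => decide (p.2 < v)) = c := by
  have hpair := List.pairwise_iff_getElem.mp hs
  conv_lhs => rw [← List.take_append_drop c s]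
  rw [List.countP_append]
  have h1 : (s.take c).countP (fun p => decide (p.2 < v)) = c := by
    have hall : ∀ a ∈ s.take c, (fun p : String × Int => decide (p.2 < v)) a = true := by
      intro a ha
      obtain ⟨j, hj, rfl⟩ := List.mem_iff_getElem.mp ha
      have hjc : j < c := by simp [List.length_take] at hj; omega
      rw [List.getElem_take]
      simpa using hlt j hjc
    rw [List.countP_eq_length.mpr hall, List.length_take]
    omega
  have h2 : (s.drop c).countP (fun p => decide (p.2 < v)) = 0 := by
    rw [List.countP_eq_zero]
    intro a ha
    obtain ⟨j, hj, rfl⟩ := List.mem_iff_getElem.mp ha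
    rw [List.getElem_drop]
    simp only [decide_eq_true_eq, not_lt]
    rcases Nat.eq_zero_or_pos j with rfl | hpos
    · simp [hv]
    · have hle := hpair c (c + j) h (by simp [List.length_drop] at hj; omega) (by omega)
      omega
  rw [h1, h2]
  omega

theorem pvALoop_eq (values : List Int) (s : List (String × Int))
    (hs : s.Pairwise (fun a b => a.2 ≤ b.2))
    (hcnt : ∀ v : Int, values.countP (fun w => decide (w < v)) = s.countP (fun p => decide (p.2 < v))) :
    ∀ n c, s.length - c = n → c ≤ s.length →
      pvALoop s (pvB values (s.take c) PySem.Dict.empty) ((c : Int) + 1) c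
        = pvB values s PySem.Dict.empty := by
  intro n
  induction n with
  | zero =>
    intro c hn hc
    have hcl : c = s.length := by omega
    rw [pvALoop]
    simp [hcl]
  | succ m ih =>
    intro c hn hc
    have hlt : c < s.length := by omega
    have hpair := List.pairwise_iff_getElem.mp hs
    have htake : s.take (c + 1) = s.take c ++ [s[c]] := by
      rw [List.take_add_one]
      simp [List.getElem?_eq_getElem hlt]
    -- finishing move: once the new dict is the B-fold of the (c+1)-prefix, recurse
    have hfin : ∀ d : PySem.Dict String Int, d = pvB values (s.take (c + 1)) PySem.Dict.empty →
        pvALoop s d ((c : Int) + 1 + 1) (c + 1) = pvB values s PySem.Dict.empty := by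
      intro d hd
      rw [hd, show ((c : Int) + 1 + 1) = (((c + 1 : Nat) : Int) + 1) by push_cast; ring]
      exact ih (c + 1) (by omega) (by omega)
    -- the value B assigns at position c
    have happ : ∀ w : Int, w = 1 + (values.countP (fun u => decide (u < (s[c]).2)) : Int) →
        (pvB values (s.take c) PySem.Dict.empty).insert (s[c]).1 w
          = pvB values (s.take (c + 1)) PySem.Dict.empty := by
      intro w hw
      rw [htake, pvB_append, hw]
      rfl
    rcases c with _ | k
    · rw [pvALoop, dif_pos hlt, dif_pos rfl]
      apply hfin
      apply happ
      have h0 : s.countP (fun p => decide (p.2 < (s[0]).2)) = 0 :=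
        pvCount_eq s hs 0 hlt _ rfl (by omega)
      rw [hcnt, h0]
      norm_num
    · rw [pvALoop, dif_pos hlt, dif_neg (Nat.succ_ne_zero k)]
      simp only [Nat.add_sub_cancel]
      have hk : k < s.length := by omega
      by_cases hgt : (s[k+1]).2 > (s[k]'hk).2
      · rw [if_pos hgt]
        apply hfin
        apply happ
        have hcount : s.countP (fun p => decide (p.2 < (s[k+1]).2)) = k + 1 := by
          apply pvCount_eq s hs (k + 1) hlt _ rfl
          intro j hj
          rcases Nat.lt_or_ge j k with hj1 | hj1
          · exact lt_of_le_of_lt (hpair j k (by omega) hk hj1) hgt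
          · have : j = k := by omega
            subst this
            exact hgt
        rw [hcnt, hcount]
        push_cast
        ring
      · rw [if_neg hgt]
        apply hfin
        apply happ
        -- tie: s[k].2 = s[k+1].2, and the previous key's stored rank is B's rank at k
        have heq : (s[k]'hk).2 = (s[k+1]).2 := by
          have hle := hpair k (k + 1) hk hlt (by omega)
          omega
        have htake1 : s.take (k + 1) = s.take k ++ [s[k]'hk] := by
          rw [List.take_add_one]
          simp [List.getElem?_eq_getElem hk]
        rw [htake1, pvB_append]
        simp [pvB, PySem.Dict.getD_insert_self, heq]

-- the first-occurrence fold of B, from an arbitrary dict (proof helper)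
def pvFirst (l : List (Int × (String × Int))) (d : PySem.Dict Int Int) : PySem.Dict Int Int :=
  l.foldl (fun d ip => d.setdefault ip.2.2 (ip.1 + 1)) d

theorem pvFirst_append (l₁ l₂ : List (Int × (String × Int))) (d : PySem.Dict Int Int) :
    pvFirst (l₁ ++ l₂) d = pvFirst l₂ (pvFirst l₁ d) := by
  simp [pvFirst, List.foldl_append]

-- B's first-occurrence dict stores, for each value that occurs in the prefix,
-- exactly 1 + (number of strictly smaller values in the whole sorted list).
theorem pvFirst_get? (s : List (String × Int)) (hs : s.Pairwise (fun a b => a.2 ≤ b.2)) :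
    ∀ c, c ≤ s.length → ∀ v : Int,
      (pvFirst (PySem.List.enumerate (s.take c)) PySem.Dict.empty).get? v
        = if v ∈ (s.take c).map (fun p => p.2)
          then some (1 + (s.countP (fun p => decide (p.2 < v)) : Int)) else none := by
  intro c
  induction c with
  | zero =>
    intro _ v
    simp [pvFirst]
  | succ c ih =>
    intro hc v
    have hlt : c < s.length := by omega
    have hpair := List.pairwise_iff_getElem.mp hs
    have htake : s.take (c + 1) = s.take c ++ [s[c]] := by
      rw [List.take_add_one]
      simp [List.getElem?_eq_getElem hlt]
    have hlen : (s.take c).length = c := by simp [List.length_take]; omega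
    rw [htake, PySem.List.enumerate_append, pvFirst_append, hlen]
    rw [show pvFirst (PySem.List.enumerate [s[c]] ((0 : Int) + (c : Nat)))
          (pvFirst (PySem.List.enumerate (s.take c)) PySem.Dict.empty)
        = (pvFirst (PySem.List.enumerate (s.take c)) PySem.Dict.empty).setdefault
            ((s[c]).2) (((0 : Int) + (c : Nat)) + 1) from by
      simp [pvFirst, PySem.List.enumerate_cons, PySem.List.enumerate_nil]]
    by_cases hv : v = (s[c]).2
    · subst hv
      rw [PySem.Dict.get?_setdefault_self, ih (by omega) _]
      by_cases hmem : (s[c]).2 ∈ (s.take c).map (fun p => p.2)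
      · rw [if_pos hmem, if_pos (by rw [List.map_append]; exact List.mem_append_right _ (by simp only [List.map_cons, List.map_nil, List.mem_singleton]))]
        rfl
      · rw [if_neg hmem, if_pos (by rw [List.map_append]; exact List.mem_append_right _ (by simp only [List.map_cons, List.map_nil, List.mem_singleton]))]
        have hcount : s.countP (fun p => decide (p.2 < (s[c]).2)) = c := by
          apply pvCount_eq s hs c hlt _ rfl
          intro j hj
          have hle := hpair j c (by omega) hlt hj
          have hne : (s[j]'(by omega)).2 ≠ (s[c]).2 := by
            intro heq
            apply hmem
            rw [List.mem_map]
            exact ⟨s[j]'(by omega), by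
              rw [List.mem_iff_getElem]
              exact ⟨j, by rw [hlen]; omega, by rw [List.getElem_take]⟩, heq⟩
          omega
        rw [hcount]
        simp only [Option.getD_none]
        congr 1
        ring
    · rw [PySem.Dict.get?_setdefault_of_ne _ _ hv, ih (by omega) v]
      by_cases hmem : v ∈ (s.take c).map (fun p => p.2)
      · rw [if_pos hmem, if_pos (by rw [List.map_append]; exact List.mem_append_left _ hmem)]
      · rw [if_neg hmem, if_neg ?_]
        rw [List.map_append]
        intro h
        rcases List.mem_append.mp h with h1 | h1
        · exact hmem h1
        · simp only [List.map_cons, List.map_nil, List.mem_singleton] at h1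
          exact hv h1

-- ===== VERDICT (by name: the statement is the Claim_ definition above) =====
theorem get_sorted_dict_indexes_spec : Claim_equal_get_sorted_dict_indexes := by
  intro u _
  unfold Spec_get_sorted_dict_indexes get_sorted_dict_indexes get_sorted_dict_indexes_alt
  set s := PySem.List.sorted u (fun p => p.2) false with hsdef
  have hs : s.Pairwise (fun a b => a.2 ≤ b.2) := PySem.List.sorted_pairwise u (fun p => p.2)
  have hcnt : ∀ v : Int,
      (u.map Prod.snd).countP (fun w => decide (w < v)) = s.countP (fun p => decide (p.2 < v)) := by
    intro v
    rw [List.countP_map]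
    exact (List.Perm.countP_eq _ (PySem.List.sorted_perm u (fun p => p.2) false)).symm
  have hmain := pvALoop_eq (u.map Prod.snd) s hs hcnt s.length 0 (by omega) (by omega)
  simp only [List.take_zero, Nat.cast_zero, zero_add] at hmain
  have hinit : pvB (u.map Prod.snd) ([] : List (String × Int)) PySem.Dict.empty = PySem.Dict.empty := rfl
  rw [hinit] at hmain
  show (pvALoop s PySem.Dict.empty 1 0).items = _
  rw [hmain]
  -- B's second fold equals the pvB fold: on every element of s, first[v] is B's rank value
  have hfirst := pvFirst_get? s hs s.length (le_refl _)
  rw [List.take_length] at hfirst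
  have hcongr : s.foldl (fun d p =>
        d.insert p.1 (((PySem.List.enumerate s).foldl
          (fun d ip => d.setdefault ip.2.2 (ip.1 + 1)) PySem.Dict.empty).getD p.2 0))
        PySem.Dict.empty
      = pvB (u.map Prod.snd) s PySem.Dict.empty := by
    unfold pvB
    apply PySem.List.foldl_congr_mem
    intro acc p hp
    have hmem : p.2 ∈ s.map (fun p => p.2) := List.mem_map.mpr ⟨p, hp, rfl⟩
    have h1 := hfirst p.2
    rw [if_pos hmem] at h1
    rw [show ((PySem.List.enumerate s).foldl
          (fun d ip => d.setdefault ip.2.2 (ip.1 + 1)) PySem.Dict.empty)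
        = pvFirst (PySem.List.enumerate s) PySem.Dict.empty from rfl]
    rw [PySem.Dict.getD_eq_get?_getD, h1, ← hcnt]
    rfl
  show (pvB (List.map Prod.snd u) s PySem.Dict.empty).items
      = (s.foldl (fun d p =>
          d.insert p.1 (((PySem.List.enumerate s).foldl
            (fun d ip => d.setdefault ip.2.2 (ip.1 + 1)) PySem.Dict.empty).getD p.2 0))
          PySem.Dict.empty).items
  rw [hcongr]
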